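-- pv_equiv track=rewrite | github.com/rkimpins/coding_challenges | coding_challenges/evolution_in_parallel/evolution_in_parallel.py | insert_stage
-- ===== SOURCE A (Python) =====
-- def is_subsequence(a, b):
--     idx_b = 0
--     for v in a:
--         try:
--             b[idx_b:].index(v)
--         except ValueError:
--             return False
--         idx_b += 1
--     return True
--
-- def insert_stage(stage, path):
--     # Stage belongs at front
--     if is_subsequence(stage, path[0]):
--         path.insert(0, stage)
--         return True
--     # Stage belongs at back
--     if is_subsequence(path[-1], stage):
--         path.insert(-1, stage)
--         return True
--     # Stage belongs somewhere in evolution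
--     for i in range(len(path)-1):
--         x1 = path[i]
--         x2 = path[i+1]
--         if is_subsequence(stage, x2) and is_subsequence(x1, stage):
--             path.insert(i+1, stage)
--             return True
--     # Stage doesn't belong in path
--     return False
-- ===== SOURCE B (Python) =====
-- def insert_stage(stage, path):
--     # Positional check, done backwards: a "fits" b iff every a[i] occurs in b at
--     # position i or later; scan i from the end, growing the suffix value set of b.
--     def fits(a, b):
--         if not a:
--             return True
--         i = len(a) - 1
--         suffix = set(b[i:])
--         while True:
--             if a[i] not in suffix:
--                 return False
--             if i == 0:
--                 return True
--             suffix.add(b[i - 1])  # in range: a[i] in set(b[i:]) forces i < len(b)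
--             i -= 1
--
--     # One scan over the n+1 boundary positions of path; position i works when the
--     # stage extends its left neighbour and is extended by its right neighbour.
--     n = len(path)
--     for i in range(n + 1):
--         if (i == 0 or fits(path[i - 1], stage)) and (i == n or fits(stage, path[i])):
--             path.insert(i, stage)
--             return True
--     return False
-- ===== Notes on version B (the rewrite author's own statement) =====
-- stated objective: alternative
-- what changed: Replaces A's three separate cases (front, back, each middle pair) by one scan over the n+1 boundary positions with a uniform neighbour condition, and replaces the forward slice-and-scan containment check by a backward scan that grows a suffix value set; the backward check has no early exit on failure, trading A's frequent early exits for a guaranteed linear pass per pair.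
import Mathlib
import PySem

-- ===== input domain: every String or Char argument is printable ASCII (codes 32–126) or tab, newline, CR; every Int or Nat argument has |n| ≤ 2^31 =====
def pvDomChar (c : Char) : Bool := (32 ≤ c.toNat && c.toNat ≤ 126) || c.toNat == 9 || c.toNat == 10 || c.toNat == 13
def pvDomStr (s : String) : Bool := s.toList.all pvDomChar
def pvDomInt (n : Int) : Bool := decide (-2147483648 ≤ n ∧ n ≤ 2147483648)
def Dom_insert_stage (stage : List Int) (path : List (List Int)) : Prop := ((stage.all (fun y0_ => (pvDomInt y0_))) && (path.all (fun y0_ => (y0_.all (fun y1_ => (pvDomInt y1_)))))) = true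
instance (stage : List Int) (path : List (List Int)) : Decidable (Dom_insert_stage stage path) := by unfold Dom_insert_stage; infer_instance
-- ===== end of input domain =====

-- B replaces A's three insertion cases (front, back, each middle pair) by one scan over the
-- n+1 boundary positions, and A's forward slice-scan containment check by a backward scan
-- growing a suffix value set. Equivalence is about the RETURN value only: both Pythons mutate
-- `path` in place, and the position they insert at can differ (A's back case inserts at -1,
-- B at the chosen boundary).

-- ===== PORT A =====
-- is_subsequence: for each v in a, b[idx_b:].index(v) (ValueError -> False), idx_b += 1
def isSubA_go (a : List Int) (b : List Int) (idx : Nat) : Bool :=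
  match a with
  | [] => true
  | v :: rest =>
    match PySem.List.index? (PySem.List.slice b (some (idx : Int)) none) v with
    | none => false
    | some _ => isSubA_go rest b (idx + 1)

def isSubA (a b : List Int) : Bool := isSubA_go a b 0

-- path[0] / path[-1] / path[i] are in range under Pre_ (path ≠ []), so pyGetD is exact here
def insert_stage (stage : List Int) (path : List (List Int)) : Bool :=
  if isSubA stage (PySem.List.pyGetD path 0 []) then true
  else if isSubA (PySem.List.pyGetD path (-1) []) stage then true
  else (PySem.List.pyRange 0 ((path.length : Int) - 1) 1).any (fun i =>
    isSubA stage (PySem.List.pyGetD path (i + 1) []) &&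
    isSubA (PySem.List.pyGetD path i []) stage)

-- ===== PORT B =====
-- the while loop of fits: i counts down; a[i] is always in range (0 ≤ i ≤ len a - 1);
-- b[i-1] is in range whenever Python reads it (a[i] ∈ set(b[i:]) forces i < len b),
-- so pyGetD is exact on the reachable reads
def fitsB_go (a b : List Int) (i : Nat) (s : PySem.Set Int) : Bool :=
  if ¬ PySem.Set.contains s (PySem.List.pyGetD a (i : Int) 0) then false
  else match i with
    | 0 => true
    | Nat.succ j => fitsB_go a b j (PySem.Set.add s (PySem.List.pyGetD b (j : Int) 0))

def fitsB (a b : List Int) : Bool :=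
  match a with
  | [] => true
  | _ :: _ =>
    fitsB_go a b (a.length - 1)
      (PySem.Set.ofList (PySem.List.slice b (some ((a.length - 1 : Nat) : Int)) none))

-- for i in range(n+1): if (i==0 or fits(path[i-1], stage)) and (i==n or fits(stage, path[i]))
def insert_stage_alt (stage : List Int) (path : List (List Int)) : Bool :=
  (PySem.List.pyRange 0 ((path.length : Int) + 1) 1).any (fun i =>
    ((i == 0) || fitsB (PySem.List.pyGetD path (i - 1) []) stage) &&
    ((i == (path.length : Int)) || fitsB stage (PySem.List.pyGetD path i [])))

-- ===== PRECONDITION & SPEC =====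
-- Python A raises IndexError on path = [] (at path[0]); excluded here.
def Pre_insert_stage (stage : List Int) (path : List (List Int)) : Prop := path ≠ []
instance (stage : List Int) (path : List (List Int)) : Decidable (Pre_insert_stage stage path) := by unfold Pre_insert_stage; infer_instance
def pvWitness_insert_stage : List Int × List (List Int) := ([1, 2], [[1], [1, 2, 3]])

def Spec_insert_stage (stage : List Int) (path : List (List Int)) (out : Bool) : Prop := out = insert_stage_alt stage path
instance (stage : List Int) (path : List (List Int)) (out : Bool) : Decidable (Spec_insert_stage stage path out) := by unfold Spec_insert_stage; infer_instance

-- ===== CLAIM (what is proved, stated in full; the proofs are below) =====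
def Claim_equal_insert_stage : Prop := ∀ (stage : List Int) (path : List (List Int)), Dom_insert_stage stage path → Pre_insert_stage stage path → Spec_insert_stage stage path (insert_stage stage path)

-- ===== LEMMAS AND PROOFS =====

-- A's forward slice-scan: every a[j] occurs in b at position (offset + j) or later
theorem isSubA_go_iff (a b : List Int) (s : Nat) :
    isSubA_go a b s = true ↔ ∀ j (h : j < a.length), a[j] ∈ b.drop (s + j) := by
  induction a generalizing s with
  | nil => simp [isSubA_go]
  | cons v rest ih =>
    simp only [isSubA_go, PySem.List.slice_from_natCast]
    rcases ho : PySem.List.index? (b.drop s) v with _ | k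
    · have hv : v ∉ b.drop s := (PySem.List.index?_eq_none_iff _ _).mp ho
      refine iff_of_false (by simp) (fun h => hv ?_)
      simpa using h 0 (by simp)
    · have hv : v ∈ b.drop s := by
        rw [← PySem.List.index?_isSome_iff (xs := b.drop s) (v := v), ho]
        rfl
      rw [ih (s + 1)]
      constructor
      · intro h j hj
        match j with
        | 0 => simpa using hv
        | Nat.succ k =>
          have := h k (by simpa using Nat.lt_of_succ_lt_succ hj)
          simpa [Nat.add_comm, Nat.add_left_comm, Nat.add_assoc] using this
      · intro h k hk
        have := h (k + 1) (by simpa using Nat.succ_lt_succ hk)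
        simpa [Nat.add_comm, Nat.add_left_comm, Nat.add_assoc] using this

-- B's backward suffix-set scan computes the same "occurs at position j or later" condition
theorem fitsB_go_iff (a b : List Int) (i : Nat) (s : PySem.Set Int)
    (hi : i < a.length) (hs : ∀ v, v ∈ s ↔ v ∈ b.drop i) :
    fitsB_go a b i s = true ↔ ∀ j (h : j < a.length), j ≤ i → a[j] ∈ b.drop j := by
  induction i generalizing s with
  | zero =>
    rw [fitsB_go, PySem.List.pyGetD_natCast, List.getD_eq_getElem _ _ hi]
    by_cases hc : a[0] ∈ s
    · have h0 : a[0] ∈ b := by simpa using (hs _).mp hc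
      simp only [PySem.Set.contains_iff] at *
      rw [if_neg (by simpa using hc)]
      refine iff_of_true rfl ?_
      intro j hj hj0
      interval_cases j
      simpa using h0
    · rw [if_pos (by simpa [PySem.Set.contains_iff] using hc)]
      refine iff_of_false (by simp) (fun h => hc ?_)
      have := h 0 hi (le_refl 0)
      simpa using (hs _).mpr (by simpa using this)
  | succ j ih =>
    rw [fitsB_go, PySem.List.pyGetD_natCast, List.getD_eq_getElem _ _ hi]
    by_cases hc : a[j+1] ∈ s
    · have hmem : a[j+1] ∈ b.drop (j+1) := (hs _).mp hc
      have hjb : j + 1 < b.length := by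
        by_contra hn
        rw [List.drop_eq_nil_of_le (by omega)] at hmem
        simp at hmem
      rw [if_neg (by simpa [PySem.Set.contains_iff] using hc),
          PySem.List.pyGetD_natCast, List.getD_eq_getElem _ _ (by omega : j < b.length)]
      rw [ih (s.add b[j]) (by omega) (fun v => by
        rw [PySem.Set.mem_add, hs v,
          List.drop_eq_getElem_cons (by omega : j < b.length), List.mem_cons]
        tauto)]
      constructor
      · intro h k hk hki
        rcases Nat.lt_or_ge k (j+1) with h1 | h1
        · exact h k hk (by omega)
        · have : k = j + 1 := by omega
          subst this; exact hmem
      · intro h k hk hkj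
        exact h k hk (by omega)
    · rw [if_pos (by simpa [PySem.Set.contains_iff] using hc)]
      refine iff_of_false (by simp) (fun h => hc ?_)
      exact (hs _).mpr (h (j+1) hi (le_refl _))

theorem fitsB_eq_isSubA (a b : List Int) : fitsB a b = isSubA a b := by
  rcases a with _ | ⟨x, xs⟩
  · rfl
  · rw [Bool.eq_iff_iff, isSubA, isSubA_go_iff]
    simp only [fitsB, PySem.List.slice_from_natCast]
    rw [fitsB_go_iff _ _ _ _ (by simp : (x::xs).length - 1 < (x::xs).length)
      (fun v => by rw [PySem.Set.mem_ofList])]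
    constructor
    · intro h j hj
      simpa using h j hj (by simp at hj ⊢; omega)
    · intro h j hj _
      simpa using h j hj

-- path[-1] and path[len(path)-1] are the same element (and both default when path = [])
theorem back_idx (path : List (List Int)) :
    PySem.List.pyGetD path (-1) [] = PySem.List.pyGetD path ((path.length : Int) - 1) [] := by
  simp only [PySem.List.pyGetD, PySem.List.pyGet?, PySem.List.pyIdx?]
  split_ifs <;> simp_all

-- the three cases of A are exactly the n+1 boundary positions of B
theorem insertA_eq_insertB (stage : List Int) (path : List (List Int)) (hp : path ≠ []) :
    insert_stage stage path = insert_stage_alt stage path := by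
  have hn : 1 ≤ path.length := List.length_pos_iff.mpr hp
  rw [Bool.eq_iff_iff]
  unfold insert_stage insert_stage_alt
  simp only [fitsB_eq_isSubA, List.any_eq_true, PySem.List.mem_pyRange_one]
  by_cases hc1 : isSubA stage (PySem.List.pyGetD path 0 []) = true
  · refine iff_of_true (by simp [hc1]) ⟨0, ⟨le_refl _, by omega⟩, ?_⟩
    have h0 : ((0 : Int) == (path.length : Int)) = false := by
      simp; omega
    simp [hc1, h0]
  · by_cases hc2 : isSubA (PySem.List.pyGetD path (-1) []) stage = true
    · rw [back_idx] at hc2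
      refine iff_of_true (by rw [back_idx]; simp [hc1, hc2]) ⟨(path.length : Int), ⟨by omega, by omega⟩, ?_⟩
      simp [hc2]
    · rw [if_neg hc1, if_neg hc2, back_idx] at *
      simp only [List.any_eq_true, PySem.List.mem_pyRange_one]
      constructor
      · rintro ⟨i, ⟨hi0, hi1⟩, hterm⟩
        refine ⟨i + 1, ⟨by omega, by omega⟩, ?_⟩
        rw [Bool.and_eq_true] at hterm
        have e1 : i + 1 - 1 = i := by ring
        simp [e1, hterm.1, hterm.2]
      · rintro ⟨j, ⟨hj0, hj1⟩, hterm⟩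
        rw [Bool.and_eq_true, Bool.or_eq_true, Bool.or_eq_true] at hterm
        obtain ⟨h1, h2⟩ := hterm
        rcases eq_or_lt_of_le hj0 with hj | hj
        · exfalso
          rcases h2 with h2 | h2
          · simp [← hj] at h2; omega
          · exact hc1 (by rwa [← hj] at h2)
        · rcases eq_or_lt_of_le (by omega : j + 1 ≤ (path.length : Int) + 1) with hjn | hjn
          · exfalso
            rcases h1 with h1 | h1
            · simp at h1; omega
            · refine hc2 ?_
              have : j - 1 = (path.length : Int) - 1 := by omega
              rwa [this] at h1
          · refine ⟨j - 1, ⟨by omega, by omega⟩, ?_⟩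
            rcases h1 with h1 | h1
            · simp at h1; omega
            · rcases h2 with h2 | h2
              · simp at h2; omega
              · have e1 : j - 1 + 1 = j := by ring
                simp [e1, h1, h2]

-- ===== VERDICT (by name: the statement is the Claim_ definition above) =====
theorem insert_stage_spec : Claim_equal_insert_stage := by
  intro stage path _ hpre
  unfold Spec_insert_stage
  exact insertA_eq_insertB stage path hpre
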